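-- pv_equiv track=rewrite | github.com/griff4692/aqa | data/main.py | _construct_ie_tuples
-- ===== SOURCE A (Python) =====
-- def _construct_ie_tuples(args, idx):
--     if idx not in args:
--         return [[]]
--
--     results = []
--     next_paths = _construct_ie_tuples(args, idx + 1)
--     for arg in args[idx]:
--         for path in next_paths:
--             results.append([arg] + path)
--     return results
-- ===== SOURCE B (Python) =====
-- def _construct_ie_tuples(args, idx):
--     results = [[]]
--     i = idx
--     while i in args:
--         results = [path + [arg] for path in results for arg in args[i]]
--         i += 1
--     return results
-- ===== Notes on version B (the rewrite author's own statement) =====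
-- stated objective: simpler
-- what changed: Replaces the recursion that builds suffixes back-to-front ([arg] + path) with a single forward while-loop that extends all prefixes in place (path + [arg]), no recursion and no intermediate level list.
import Mathlib
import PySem

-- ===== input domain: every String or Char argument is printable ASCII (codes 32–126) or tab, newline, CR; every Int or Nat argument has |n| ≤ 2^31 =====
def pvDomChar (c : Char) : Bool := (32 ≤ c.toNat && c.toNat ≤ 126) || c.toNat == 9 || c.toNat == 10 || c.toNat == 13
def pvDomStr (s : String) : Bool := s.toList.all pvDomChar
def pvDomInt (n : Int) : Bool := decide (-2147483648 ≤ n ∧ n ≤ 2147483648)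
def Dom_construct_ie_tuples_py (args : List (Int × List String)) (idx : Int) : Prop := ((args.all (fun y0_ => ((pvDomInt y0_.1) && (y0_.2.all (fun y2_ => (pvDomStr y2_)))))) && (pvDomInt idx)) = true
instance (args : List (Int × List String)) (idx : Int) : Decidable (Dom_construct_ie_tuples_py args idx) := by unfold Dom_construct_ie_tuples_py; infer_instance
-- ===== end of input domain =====

-- B replaces A's recursion (which prepends [arg] + path to recursively built suffixes) by a
-- single forward while-loop that extends all prefixes with path + [arg]; same output, same
-- cost (objective: simpler iterative decomposition).

-- ===== PORT A =====
-- dict lookup (first match, as in a Python dict rendered as an association list)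
def pvLookup (args : List (Int × List String)) (k : Int) : Option (List String) :=
  (args.find? (fun p => p.1 == k)).map (·.2)

-- termination measure: number of entries with key ≥ idx strictly drops when idx is a key
theorem pvLookup_measure (args : List (Int × List String)) (idx : Int) (l : List String)
    (h : pvLookup args idx = some l) :
    args.countP (fun p => decide (idx < p.1)) < args.countP (fun p => decide (idx ≤ p.1)) := by
  induction args with
  | nil => simp [pvLookup] at h
  | cons p rest ih =>
    simp only [pvLookup, List.find?_cons] at h
    simp only [List.countP_cons]
    have hmono : rest.countP (fun p => decide (idx < p.1)) ≤ rest.countP (fun p => decide (idx ≤ p.1)) := by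
      apply List.countP_mono_left
      intro x _ hx
      simp at hx ⊢
      omega
    by_cases hk : p.1 = idx
    · have h1 : ¬ (idx < p.1) := by omega
      have h2 : idx ≤ p.1 := by omega
      simp [h1, h2]
      omega
    · have hne : (p.1 == idx) = false := by simp [hk]
      simp [hne] at h
      have := ih (by simpa [pvLookup] using h)
      by_cases hlt : idx < p.1
      · have : idx ≤ p.1 := by omega
        simp [hlt, this]
        omega
      · have e1 : (decide (idx < p.1)) = false := by simp [hlt]
        by_cases hle : idx ≤ p.1
        · have e2 : (decide (idx ≤ p.1)) = true := by simp [hle]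
          simp only [e1, e2, if_true]
          omega
        · have e2 : (decide (idx ≤ p.1)) = false := by simp [hle]
          simp only [e1, e2]
          omega

theorem pvLookup_measure' (args : List (Int × List String)) (idx : Int) (l : List String)
    (h : pvLookup args idx = some l) :
    args.countP (fun p => decide (idx + 1 ≤ p.1)) < args.countP (fun p => decide (idx ≤ p.1)) := by
  have e : args.countP (fun p => decide (idx + 1 ≤ p.1)) = args.countP (fun p => decide (idx < p.1)) :=
    List.countP_congr (fun x _ => by simp only [decide_eq_true_eq]; omega)
  exact lt_of_eq_of_lt e (pvLookup_measure args idx l h)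

def construct_ie_tuples_py (args : List (Int × List String)) (idx : Int) : List (List String) :=
  match h : pvLookup args idx with
  | none => [[]]
  | some lst =>
    let next_paths := construct_ie_tuples_py args (idx + 1)
    lst.foldl (fun results arg =>
      next_paths.foldl (fun results path => results ++ [arg :: path]) results) []
termination_by args.countP (fun p => decide (idx ≤ p.1))
decreasing_by exact pvLookup_measure' args idx lst h

-- ===== PORT B =====
-- the comprehension [path + [arg] for path in results for arg in lst]
def pvExtend (results : List (List String)) (lst : List String) : List (List String) :=
  results.flatMap (fun path => lst.map (fun arg => path ++ [arg]))

-- the while-loop; fuel only makes this total (args.length + 1 provably exceeds the number of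
-- iterations, see pvWhile_fuel below), the computation is exactly B's loop body
def pvWhile (args : List (Int × List String)) (fuel : Nat) (i : Int)
    (results : List (List String)) : List (List String) :=
  match fuel with
  | 0 => results
  | fuel + 1 =>
    match (args.find? (fun p => p.1 == i)).map (·.2) with
    | none => results
    | some lst => pvWhile args fuel (i + 1) (pvExtend results lst)

def construct_ie_tuples_py_alt (args : List (Int × List String)) (idx : Int) : List (List String) :=
  pvWhile args (args.length + 1) idx [[]]

-- ===== PRECONDITION & SPEC =====
def Spec_construct_ie_tuples_py (args : List (Int × List String)) (idx : Int) (out : List (List String)) : Prop := out = construct_ie_tuples_py_alt args idx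
instance (args : List (Int × List String)) (idx : Int) (out : List (List String)) : Decidable (Spec_construct_ie_tuples_py args idx out) := by unfold Spec_construct_ie_tuples_py; infer_instance

-- ===== CLAIM (what is proved, stated in full; the proofs are below) =====
def Claim_equal_construct_ie_tuples_py : Prop := ∀ (args : List (Int × List String)) (idx : Int), Dom_construct_ie_tuples_py args idx → Spec_construct_ie_tuples_py args idx (construct_ie_tuples_py args idx)

-- ===== LEMMAS AND PROOFS =====

-- proof-only helper: the list of consecutive levels args[i], args[i+1], …
def pvGather (args : List (Int × List String)) (i : Int) : List (List String) :=
  match h : pvLookup args i with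
  | none => []
  | some l => l :: pvGather args (i + 1)
termination_by args.countP (fun p => decide (i ≤ p.1))
decreasing_by exact pvLookup_measure' args i l h

def pvStepA (lst : List String) (results : List (List String)) : List (List String) :=
  lst.flatMap (fun arg => results.map (fun path => arg :: path))

theorem cit_unfold_none (args : List (Int × List String)) (idx : Int)
    (h : pvLookup args idx = none) : construct_ie_tuples_py args idx = [[]] := by
  rw [construct_ie_tuples_py]
  split
  · rfl
  · rename_i lst h'; rw [h] at h'; cases h'

theorem cit_unfold_some (args : List (Int × List String)) (idx : Int) (lst : List String)
    (h : pvLookup args idx = some lst) :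
    construct_ie_tuples_py args idx =
      lst.foldl (fun results arg =>
        (construct_ie_tuples_py args (idx + 1)).foldl
          (fun results path => results ++ [arg :: path]) results) [] := by
  rw [construct_ie_tuples_py]
  split
  · rename_i h'; rw [h] at h'; cases h'
  · rename_i l h'; rw [h] at h'; cases h'; rfl

theorem gather_unfold_none (args : List (Int × List String)) (i : Int)
    (h : pvLookup args i = none) : pvGather args i = [] := by
  rw [pvGather]
  split
  · rfl
  · rename_i l h'; rw [h] at h'; cases h'

theorem gather_unfold_some (args : List (Int × List String)) (i : Int) (lst : List String)
    (h : pvLookup args i = some lst) : pvGather args i = lst :: pvGather args (i + 1) := by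
  rw [pvGather]
  split
  · rename_i h'; rw [h] at h'; cases h'
  · rename_i l h'; rw [h] at h'; cases h'; rfl

-- A computes the backward (suffix) fold of the levels
theorem construct_eq_foldr (args : List (Int × List String)) (idx : Int) :
    construct_ie_tuples_py args idx = (pvGather args idx).foldr pvStepA [[]] := by
  induction idx using construct_ie_tuples_py.induct args with
  | case1 idx h => rw [cit_unfold_none args idx h, gather_unfold_none args idx h]; rfl
  | case2 idx lst h ih =>
    rw [cit_unfold_some args idx lst h, gather_unfold_some args idx lst h]
    simp only [List.foldr_cons]
    rw [← ih]
    unfold pvStepA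
    calc lst.foldl (fun results arg =>
            (construct_ie_tuples_py args (idx + 1)).foldl (fun results path => results ++ [arg :: path]) results) []
        = lst.foldl (fun results arg =>
            results ++ (construct_ie_tuples_py args (idx + 1)).map (fun path => arg :: path)) [] := by
          apply PySem.List.foldl_congr_mem
          intro acc x _
          exact PySem.List.foldl_append_singleton_eq_map (fun path => x :: path) _ acc
      _ = lst.flatMap (fun arg => (construct_ie_tuples_py args (idx + 1)).map (fun path => arg :: path)) := by
          rw [PySem.List.foldl_append_eq_flatMap]; simp

-- the two product-building steps commute
theorem stepA_extend_comm (x : List String) (R : List (List String)) (l : List String) :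
    pvStepA x (pvExtend R l) = pvExtend (pvStepA x R) l := by
  simp [pvStepA, pvExtend, List.map_flatMap, List.flatMap_map, List.map_map, List.flatMap_assoc, Function.comp_def]

-- prefix fold = suffix fold
theorem foldl_extend_eq_foldr (levels : List (List String)) :
    levels.foldl pvExtend [[]] = levels.foldr pvStepA [[]] := by
  induction levels using List.reverseRecOn with
  | nil => rfl
  | append_singleton ls l ih =>
    rw [List.foldl_append, List.foldl_cons, List.foldl_nil, ih]
    clear ih
    induction ls with
    | nil =>
      simp only [List.nil_append, List.foldr_cons, List.foldr_nil, pvStepA, pvExtend]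
      induction l <;> simp_all
    | cons x ls ih =>
      rw [List.cons_append, List.foldr_cons, List.foldr_cons, ← ih, stepA_extend_comm]

-- the fuel bound: pvGather has at most countP (i ≤ key) ≤ args.length levels
theorem gather_length_le (args : List (Int × List String)) (i : Int) :
    (pvGather args i).length ≤ args.countP (fun p => decide (i ≤ p.1)) := by
  induction i using pvGather.induct args with
  | case1 i h => rw [gather_unfold_none args i h]; simp
  | case2 i l h ih =>
    rw [gather_unfold_some args i l h]
    have := pvLookup_measure' args i l h
    simp only [List.length_cons]
    omega

theorem pvWhile_eq_foldl (args : List (Int × List String)) (fuel : Nat) (i : Int)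
    (results : List (List String)) (hf : (pvGather args i).length < fuel) :
    pvWhile args fuel i results = (pvGather args i).foldl pvExtend results := by
  induction fuel generalizing i results with
  | zero => omega
  | succ fuel ih =>
    rw [pvWhile]
    cases h : pvLookup args i with
    | none =>
      rw [gather_unfold_none args i h]
      simp only [pvLookup] at h
      simp [h]
    | some lst =>
      rw [gather_unfold_some args i lst h]
      have h' : (args.find? (fun p => p.1 == i)).map (·.2) = some lst := h
      rw [h']
      rw [List.foldl_cons]
      apply ih
      rw [gather_unfold_some args i lst h] at hf
      simp only [List.length_cons] at hf
      omega

-- ===== VERDICT (by name: the statement is the Claim_ definition above) =====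
theorem construct_ie_tuples_py_spec : Claim_equal_construct_ie_tuples_py := by
  intro args idx _
  unfold Spec_construct_ie_tuples_py construct_ie_tuples_py_alt
  have hb : (pvGather args idx).length < args.length + 1 := by
    have h1 := gather_length_le args idx
    have h2 : args.countP (fun p => decide (idx ≤ p.1)) ≤ args.length := List.countP_le_length
    omega
  rw [pvWhile_eq_foldl args (args.length + 1) idx [[]] hb,
      foldl_extend_eq_foldr, construct_eq_foldr]
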